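-- pv_equiv track=rewrite | github.com/yo0919/Assignment_12 | main.py | train_file_list_to_json
-- ===== SOURCE A (Python) =====
-- from typing import List
--
-- def train_file_list_to_json(english_file_list: List[str], german_file_list: List[str]) -> List[str]:
--     def process_file(file):
--         file = file.strip()  # 파일의 양 끝 공백 제거
--         if '\\' in file:
--             file = file.replace('\\', '\\\\')
--         if '/' in file:
--             file = file.replace('/', '\\/')
--         if '"' in file:
--             file = file.replace('"', '\\"')
--         return file
--
--     template = '{{"English":"{}","German":"{}"}}'
--
--     processed_file_list = []
--     for english_file, german_file in zip(english_file_list, german_file_list):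
--         processed_file_list.append(template.format(process_file(english_file), process_file(german_file)))
--     return processed_file_list
-- ===== SOURCE B (Python) =====
-- from typing import List
--
-- def _escape(s: str) -> str:
--     # one char-by-char pass: emit a backslash before each of \ / " in the stripped name
--     out = []
--     for c in s.strip():
--         if c in '\\/"':
--             out.append('\\')
--         out.append(c)
--     return ''.join(out)
--
-- def train_file_list_to_json(english_file_list: List[str], german_file_list: List[str]) -> List[str]:
--     # build the records back-to-front with an index countdown, then reverse once
--     out = []
--     i = min(len(english_file_list), len(german_file_list))
--     while i:
--         i -= 1
--         out.append('{"English":"' + _escape(english_file_list[i])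
--                    + '","German":"' + _escape(german_file_list[i]) + '"}')
--     out.reverse()
--     return out
-- ===== Notes on version B (the rewrite author's own statement) =====
-- stated objective: alternative
-- what changed: B builds the records back-to-front with an index countdown while-loop over min(len,len) followed by one reverse, instead of A's forward zip/append loop, and escapes each stripped name in one hand-written char-by-char pass prepending a backslash before \ / " instead of A's three conditional whole-string replace passes.
import Mathlib
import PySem

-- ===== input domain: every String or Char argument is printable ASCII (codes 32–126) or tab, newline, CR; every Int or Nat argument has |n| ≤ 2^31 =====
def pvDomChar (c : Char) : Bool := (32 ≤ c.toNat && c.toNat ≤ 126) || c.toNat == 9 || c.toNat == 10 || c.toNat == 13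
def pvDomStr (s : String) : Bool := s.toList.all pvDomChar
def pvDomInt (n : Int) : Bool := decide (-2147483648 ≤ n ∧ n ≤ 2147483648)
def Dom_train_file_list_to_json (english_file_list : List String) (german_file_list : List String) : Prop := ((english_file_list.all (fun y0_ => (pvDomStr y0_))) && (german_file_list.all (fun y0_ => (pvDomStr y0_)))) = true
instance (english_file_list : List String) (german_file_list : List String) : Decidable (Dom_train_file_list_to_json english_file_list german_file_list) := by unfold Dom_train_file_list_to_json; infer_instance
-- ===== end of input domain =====

-- B replaces A's iterative append loop and three whole-string replace passes by
-- structural recursion over the pair of lists with a single char-by-char escaping pass (alternative decomposition, same cost).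


-- ===== PORT A =====
-- process_file: strip, then three conditional str.replace passes, in A's order
def pvProcessFileA (file : String) : List Char :=
  let f0 := PySem.Chars.strip file.toList
  let f1 := if PySem.Chars.isIn ['\\'] f0 then PySem.Chars.replace f0 ['\\'] ['\\', '\\'] else f0
  let f2 := if PySem.Chars.isIn ['/'] f1 then PySem.Chars.replace f1 ['/'] ['\\', '/'] else f1
  if PySem.Chars.isIn ['"'] f2 then PySem.Chars.replace f2 ['"'] ['\\', '"'] else f2

-- template.format(x, y) = '{"English":"' ++ x ++ '","German":"' ++ y ++ '"}'
def pvTemplateA (x y : List Char) : String :=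
  String.ofList ("{\"English\":\"".toList ++ x ++ "\",\"German\":\"".toList ++ y ++ "\"}".toList)

def train_file_list_to_json (english_file_list : List String) (german_file_list : List String) : List String :=
  (english_file_list.zip german_file_list).foldl
    (fun acc p => acc ++ [pvTemplateA (pvProcessFileA p.1) (pvProcessFileA p.2)]) []

-- ===== PORT B =====
-- _escape: one char-by-char pass over the stripped name, prepending '\' to \ / "
def pvEscapeB (s : String) : List Char :=
  (PySem.Chars.strip s.toList).foldl
    (fun out c => if c ∈ ['\\', '/', '"'] then out ++ ['\\', c] else out ++ [c]) []

def pvRecordB (e g : String) : String :=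
  String.ofList ("{\"English\":\"".toList ++ pvEscapeB e ++ "\",\"German\":\"".toList
    ++ pvEscapeB g ++ "\"}".toList)

-- the while-loop countdown: appends records for indices i-1, …, 0
def pvLoopB (e g : List String) : Nat → List String → List String
  | 0, out => out
  | i + 1, out =>
      pvLoopB e g i (out ++ [pvRecordB ((PySem.List.pyGet? e (i : Int)).getD "")
                                        ((PySem.List.pyGet? g (i : Int)).getD "")])

def train_file_list_to_json_alt (english_file_list : List String) (german_file_list : List String) : List String :=
  (pvLoopB english_file_list german_file_list
    (min english_file_list.length german_file_list.length) []).reverse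

-- ===== PRECONDITION & SPEC =====
def Spec_train_file_list_to_json (english_file_list : List String) (german_file_list : List String) (out : List String) : Prop := out = train_file_list_to_json_alt english_file_list german_file_list
instance (english_file_list : List String) (german_file_list : List String) (out : List String) : Decidable (Spec_train_file_list_to_json english_file_list german_file_list out) := by unfold Spec_train_file_list_to_json; infer_instance

-- ===== CLAIM (what is proved, stated in full; the proofs are below) =====
def Claim_equal_train_file_list_to_json : Prop := ∀ (english_file_list : List String) (german_file_list : List String), Dom_train_file_list_to_json english_file_list german_file_list → Spec_train_file_list_to_json english_file_list german_file_list (train_file_list_to_json english_file_list german_file_list)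

-- ===== LEMMAS AND PROOFS =====

-- single-character replace is a flatMap (characterisation of PySem.Chars.replace.go)
lemma replace_go_single (c : Char) (new : List Char) :
    ∀ (l : List Char) (fuel : Nat) (acc : List Char), l.length ≤ fuel →
      PySem.Chars.replace.go [c] new fuel l acc
        = acc.reverse ++ l.flatMap (fun x => if x = c then new else [x]) := by
  intro l
  induction l with
  | nil => intro fuel acc _; cases fuel <;> simp [PySem.Chars.replace.go]
  | cons x t ih =>
      intro fuel acc h
      cases fuel with
      | zero => simp at h
      | succ f =>
          simp only [PySem.Chars.replace.go]
          by_cases hx : x = c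
          · subst hx
            have hpre : List.isPrefixOf [x] (x :: t) = true := by
              simp [List.isPrefixOf]
            simp only [hpre, if_pos, List.drop_succ_cons, List.length_nil, List.drop_zero,
              List.length_cons] at *
            rw [ih f (new.reverse ++ acc) (by omega)]
            simp
          · have hpre : List.isPrefixOf [c] (x :: t) = false := by
              simp [List.isPrefixOf]; exact fun h => absurd h.symm hx
            simp only [hpre, Bool.false_eq_true, if_false]
            rw [ih f (x :: acc) (by simpa using Nat.le_of_succ_le_succ h)]
            simp [hx]

lemma replace_single (c : Char) (new s : List Char) :
    PySem.Chars.replace s [c] new = s.flatMap (fun x => if x = c then new else [x]) := by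
  simp only [PySem.Chars.replace, List.isEmpty_cons, Bool.false_eq_true, if_false]
  simpa using replace_go_single c new s s.length [] (le_refl _)

-- if c does not occur, the flatMap is the identity
lemma flatMap_esc_id {c : Char} {new s : List Char} (h : c ∉ s) :
    s.flatMap (fun x => if x = c then new else [x]) = s := by
  induction s with
  | nil => simp
  | cons x t ih =>
      simp only [List.mem_cons, not_or] at h
      simp [Ne.symm h.1, ih h.2]

lemma isIn_single_iff (c : Char) (s : List Char) :
    PySem.Chars.isIn [c] s = true ↔ c ∈ s := by
  rw [PySem.Chars.isIn_iff_infix]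
  constructor
  · intro h; exact h.subset (by simp)
  · intro h
    obtain ⟨l, r, rfl⟩ := List.mem_iff_append.mp h
    exact ⟨l, r, by simp⟩

-- each conditional replace equals the unconditional flatMap form
lemma cond_replace_eq (c : Char) (new s : List Char) :
    (if PySem.Chars.isIn [c] s then PySem.Chars.replace s [c] new else s)
      = s.flatMap (fun x => if x = c then new else [x]) := by
  by_cases h : PySem.Chars.isIn [c] s = true
  · simp [h, replace_single]
  · have hc : c ∉ s := fun hm => h ((isIn_single_iff c s).mpr hm)
    simp [h, flatMap_esc_id hc]

-- B's append-accumulator char loop is a flatMap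
lemma escB_foldl_eq (s : List Char) (acc : List Char) :
    s.foldl (fun out c => if c ∈ ['\\', '/', '"'] then out ++ ['\\', c] else out ++ [c]) acc
      = acc ++ s.flatMap (fun c => if c ∈ ['\\', '/', '"'] then ['\\', c] else [c]) := by
  induction s generalizing acc with
  | nil => simp
  | cons x t ih =>
      simp only [List.foldl_cons, List.flatMap_cons]
      rw [ih]
      by_cases h : x ∈ ['\\', '/', '"'] <;> simp [h]

-- the per-string core: A's three passes = B's one pass
lemma processA_eq_escB (file : String) : pvProcessFileA file = pvEscapeB file := by
  unfold pvProcessFileA pvEscapeB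
  simp only [cond_replace_eq, escB_foldl_eq, List.nil_append]
  generalize PySem.Chars.strip file.toList = s
  induction s with
  | nil => simp
  | cons x t ih =>
      by_cases h1 : x = '\\'
      · subst h1; simp_all
      · by_cases h2 : x = '/'
        · subst h2; simp_all
        · by_cases h3 : x = '"'
          · subst h3; simp_all
          · simp_all

-- A's append-accumulator loop is a map
lemma foldl_append_template (l : List (String × String)) (acc : List String) :
    l.foldl (fun acc p => acc ++ [pvTemplateA (pvProcessFileA p.1) (pvProcessFileA p.2)]) acc
      = acc ++ l.map (fun p => pvTemplateA (pvProcessFileA p.1) (pvProcessFileA p.2)) := by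
  induction l generalizing acc with
  | nil => simp
  | cons x t ih => simp [ih]

-- the record at index i (proof-side abbreviation for the loop body's value)
def pvRecAtB (e g : List String) (i : Nat) : String :=
  pvRecordB ((PySem.List.pyGet? e (i : Int)).getD "") ((PySem.List.pyGet? g (i : Int)).getD "")

-- the countdown loop builds the reversed map over the index range
lemma loopB_eq (e g : List String) :
    ∀ (n : Nat) (out : List String),
      pvLoopB e g n out = out ++ ((List.range n).reverse.map (pvRecAtB e g)) := by
  intro n
  induction n with
  | zero => intro out; simp [pvLoopB]
  | succ m ih =>
      intro out
      rw [pvLoopB, ih, List.range_succ]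
      simp [pvRecAtB]

lemma recAtB_succ (x y : String) (xs ys : List String) (i : Nat) :
    pvRecAtB (x :: xs) (y :: ys) (i + 1) = pvRecAtB xs ys i := by
  have h : ((i + 1 : Nat) : Int) = (i : Int) + 1 := by push_cast; ring
  simp [pvRecAtB, h, PySem.List.pyGet?_cons_succ]

-- the index map over range(min) is the map over the zip
lemma range_map_eq_zip (e : List String) :
    ∀ (g : List String),
      (List.range (min e.length g.length)).map (pvRecAtB e g)
        = (e.zip g).map (fun p => pvRecordB p.1 p.2) := by
  induction e with
  | nil => intro g; simp
  | cons x xs ih =>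
      intro g
      cases g with
      | nil => simp
      | cons y ys =>
          have hmin : min (x :: xs).length (y :: ys).length = min xs.length ys.length + 1 := by
            simp [Nat.succ_min_succ]
          rw [hmin, List.range_succ_eq_map]
          simp only [List.map_cons, List.map_map, List.zip_cons_cons]
          have h0 : pvRecAtB (x :: xs) (y :: ys) 0 = pvRecordB x y := by
            simp [pvRecAtB]
          have ht : List.map (pvRecAtB (x :: xs) (y :: ys) ∘ Nat.succ)
              (List.range (min xs.length ys.length)) = List.map (pvRecAtB xs ys)
              (List.range (min xs.length ys.length)) :=
            List.map_congr_left (fun i _ => recAtB_succ x y xs ys i)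
          rw [h0, ht, ih ys]

-- the records are equal string-by-string
lemma templateA_eq_recordB (a b : String) :
    pvTemplateA (pvProcessFileA a) (pvProcessFileA b) = pvRecordB a b := by
  simp [pvTemplateA, pvRecordB, processA_eq_escB]

-- ===== VERDICT (by name: the statement is the Claim_ definition above) =====
theorem train_file_list_to_json_spec : Claim_equal_train_file_list_to_json := by
  intro e g _
  show train_file_list_to_json e g = train_file_list_to_json_alt e g
  unfold train_file_list_to_json train_file_list_to_json_alt
  rw [foldl_append_template, List.nil_append, loopB_eq, List.nil_append,
    List.map_reverse, List.reverse_reverse, range_map_eq_zip]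
  exact List.map_congr_left (fun p _ => templateA_eq_recordB p.1 p.2)
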